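-- pv_equiv track=rewrite | github.com/melkemk/-Image-search-gallery | camp/week1/distance-between-bus-stops.py | distanceBetweenBusStops
-- ===== SOURCE A (Python) =====
-- from typing import List
--
-- def distanceBetweenBusStops(distance: List[int], start: int, destination: int) -> int:
--     if(start==destination):
--         return 0
--     if(start>destination):
--         start,destination=destination,start
--     ans=0
--     first=0
--     for i in range(start):
--         first+=distance[i]
--     for i in range(start,destination):
--         ans+=distance[i]
--     for i in range(destination,len(distance)):
--         first+=distance[i]
--     return min(ans,first)
-- ===== SOURCE B (Python) =====
-- def distanceBetweenBusStops(distance, start, destination):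
--     n = len(distance)
--
--     def walk(i, j):
--         # simulate riding the bus forward from stop i until stop j (at most n hops)
--         acc = 0
--         for _ in range(n):
--             if i == j:
--                 break
--             acc += distance[i]
--             i = (i + 1) % n
--         return acc
--
--     return min(walk(start, destination), walk(destination, start))
-- ===== Notes on version B (the rewrite author's own statement) =====
-- stated objective: alternative
-- what changed: Replaces A's swap branch and three partitioned index-range loops by direct simulation of the circular route: walk forward stop by stop with i = (i+1) % n from start to destination and from destination to start, and take the min of the two accumulated walks.
-- outside the precondition, e.g. on distanceBetweenBusStops([5, 7], -1, 1): A returns 7, B returns 12; on distanceBetweenBusStops([5, 7], 0, 2): A returns 0, B raises IndexError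
import Mathlib
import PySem

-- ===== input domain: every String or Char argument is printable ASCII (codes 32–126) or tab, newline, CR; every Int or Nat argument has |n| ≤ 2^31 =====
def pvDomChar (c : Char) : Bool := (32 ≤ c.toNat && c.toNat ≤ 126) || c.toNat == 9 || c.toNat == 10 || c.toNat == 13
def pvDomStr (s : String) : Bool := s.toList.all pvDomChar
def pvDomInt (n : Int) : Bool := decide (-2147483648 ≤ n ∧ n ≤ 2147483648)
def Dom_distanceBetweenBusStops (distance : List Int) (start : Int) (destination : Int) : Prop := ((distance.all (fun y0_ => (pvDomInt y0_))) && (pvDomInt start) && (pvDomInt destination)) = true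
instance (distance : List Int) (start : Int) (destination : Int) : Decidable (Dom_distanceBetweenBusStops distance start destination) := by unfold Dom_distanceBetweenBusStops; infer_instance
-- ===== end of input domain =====

-- B simulates the circular route directly (walk forward (i+1) % n both ways, min of the two
-- walks) instead of A's swap branch and three partitioned index loops (alternative; same O(n)).

-- ===== PORT A =====
def distanceBetweenBusStops (distance : List Int) (start : Int) (destination : Int) : Int :=
  if start = destination then 0
  else
    -- 'start, destination = destination, start' when start > destination
    let s := if start > destination then destination else start
    let d := if start > destination then start else destination
    let ans := (PySem.List.pyRange s d 1).foldl
      (fun acc i => acc + PySem.List.pyGetD distance i 0) 0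
    let first := (PySem.List.pyRange 0 s 1).foldl
      (fun acc i => acc + PySem.List.pyGetD distance i 0) 0
    let first := (PySem.List.pyRange d (distance.length : Int) 1).foldl
      (fun acc i => acc + PySem.List.pyGetD distance i 0) first
    min ans first

-- ===== PORT B =====
-- the local 'walk(i, j)': for _ in range(n): if i == j: break; acc += distance[i]; i = (i+1) % n
-- (state = (acc, i, broken); pyGetD is exact here since inside Pre_ every visited i is in range)
def pvWalkB (distance : List Int) (n : Nat) (i0 : Int) (j : Int) : Int :=
  ((List.range n).foldl
    (fun st _ =>
      match st with
      | (acc, i, br) =>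
        if br then (acc, i, br)
        else if i = j then (acc, i, true)
        else (acc + PySem.List.pyGetD distance i 0, PySem.Int.mod (i + 1) (n : Int), false))
    (0, i0, false)).1

def distanceBetweenBusStops_alt (distance : List Int) (start : Int) (destination : Int) : Int :=
  let n := distance.length
  min (pvWalkB distance n start destination) (pvWalkB distance n destination start)

-- ===== PRECONDITION & SPEC =====
-- Pre_ restricts to the problem's natural domain: stop indices in [0, n), plus all equal
-- pairs (where neither program ever indexes the list).  Outside it A raises IndexError, or
-- returns accidental negative-index-wraparound / boundary-index-n sums that no specification
-- covers, while B's circular walk raises IndexError or returns a different accidental sum there.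
def Pre_distanceBetweenBusStops (distance : List Int) (start : Int) (destination : Int) : Prop :=
  (0 ≤ start ∧ start < distance.length ∧ 0 ≤ destination ∧ destination < distance.length)
  ∨ start = destination
instance (distance : List Int) (start : Int) (destination : Int) : Decidable (Pre_distanceBetweenBusStops distance start destination) := by unfold Pre_distanceBetweenBusStops; infer_instance

def pvWitness_distanceBetweenBusStops : List Int × Int × Int := ([1, 2, 3, 4], 0, 2)

def Spec_distanceBetweenBusStops (distance : List Int) (start : Int) (destination : Int) (out : Int) : Prop := out = distanceBetweenBusStops_alt distance start destination
instance (distance : List Int) (start : Int) (destination : Int) (out : Int) : Decidable (Spec_distanceBetweenBusStops distance start destination out) := by unfold Spec_distanceBetweenBusStops; infer_instance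

-- ===== CLAIM (what is proved, stated in full; the proofs are below) =====
def Claim_equal_distanceBetweenBusStops : Prop := ∀ (distance : List Int) (start : Int) (destination : Int), Dom_distanceBetweenBusStops distance start destination → Pre_distanceBetweenBusStops distance start destination → Spec_distanceBetweenBusStops distance start destination (distanceBetweenBusStops distance start destination)

-- ===== LEMMAS AND PROOFS =====

-- the step function of B's loop (proof-side name for the fold body)
def pvStep (d : List Int) (n : Nat) (j : Int) (st : Int × Int × Bool) : Int × Int × Bool :=
  match st with
  | (acc, i, br) =>
    if br then (acc, i, br)
    else if i = j then (acc, i, true)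
    else (acc + PySem.List.pyGetD d i 0, PySem.Int.mod (i + 1) (n : Int), false)

-- sum accumulated by k forward hops starting at i
def pvWalkSum (d : List Int) (n : Nat) : Nat → Int → Int
  | 0, _ => 0
  | k + 1, i => PySem.List.pyGetD d i 0 + pvWalkSum d n k (PySem.Int.mod (i + 1) (n : Int))

theorem pv_foldl_range_const {σ : Type} (F : σ → σ) :
    ∀ (m : Nat) (s : σ), (List.range m).foldl (fun st _ => F st) s = F^[m] s := by
  intro m
  induction m with
  | zero => intro s; simp
  | succ m ih =>
    intro s
    rw [List.range_succ, List.foldl_append, ih, Function.iterate_succ_apply']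
    simp

theorem pv_step_done (d : List Int) (n : Nat) (j : Int) (acc i : Int) :
    ∀ m, (pvStep d n j)^[m] (acc, i, true) = (acc, i, true) := by
  intro m
  induction m with
  | zero => rfl
  | succ m ih => rw [Function.iterate_succ_apply]; simpa [pvStep] using ih

-- main invariant: starting un-broken at i, after m > k iterations the loop has broken at j
-- having accumulated exactly the k-hop walk sum, where k = (j - i) mod n is the hop count
theorem pv_iter_walk (d : List Int) (n : Nat) (j : Int) (hn : 0 < n)
    (hj0 : 0 ≤ j) (hjn : j < (n : Int)) :
    ∀ (k : Nat), ∀ (m : Nat) (i acc : Int), 0 ≤ i → i < (n : Int) →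
      ((j - i) % (n : Int)).toNat = k → k < m →
      (pvStep d n j)^[m] (acc, i, false) = (acc + pvWalkSum d n k i, j, true) := by
  intro k
  induction k with
  | zero =>
    intro m i acc hi0 hin hk hkm
    -- (j - i) mod n = 0 with both in [0, n) forces i = j
    have hnn : (0 : Int) ≤ (j - i) % (n : Int) :=
      Int.emod_nonneg _ (by omega)
    have hij : i = j := by
      by_cases hle : i ≤ j
      · have : (j - i) % (n : Int) = j - i := Int.emod_eq_of_lt (by omega) (by omega)
        omega
      · have h1 : (j - i) % (n : Int) = (j - i + (n : Int) * 1) % (n : Int) :=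
          (Int.add_mul_emod_self_left (j - i) (n : Int) 1).symm
        have h2 : (j - i + (n : Int) * 1) % (n : Int) = j - i + (n : Int) * 1 :=
          Int.emod_eq_of_lt (by omega) (by omega)
        omega
    obtain ⟨m', rfl⟩ : ∃ m', m = m' + 1 := ⟨m - 1, by omega⟩
    rw [Function.iterate_succ_apply]
    have hstep : pvStep d n j (acc, i, false) = (acc, i, true) := by
      simp [pvStep, hij]
    rw [hstep, pv_step_done]
    simp [pvWalkSum, hij]
  | succ k ih =>
    intro m i acc hi0 hin hk hkm
    have hij : i ≠ j := by
      intro h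
      subst h
      simp at hk
    obtain ⟨m', rfl⟩ : ∃ m', m = m' + 1 := ⟨m - 1, by omega⟩
    rw [Function.iterate_succ_apply]
    have hmod : PySem.Int.mod (i + 1) (n : Int) = (i + 1) % (n : Int) :=
      PySem.Int.mod_eq_emod_of_pos (by exact_mod_cast hn)
    have hstep : pvStep d n j (acc, i, false)
        = (acc + PySem.List.pyGetD d i 0, (i + 1) % (n : Int), false) := by
      simp [pvStep, hij, hmod]
    rw [hstep]
    set i' := (i + 1) % (n : Int) with hi'
    have hi'0 : 0 ≤ i' := Int.emod_nonneg _ (by omega)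
    have hi'n : i' < (n : Int) := Int.emod_lt_of_pos _ (by exact_mod_cast hn)
    have hknat : (j - i) % (n : Int) = ((k : Int) + 1) := by
      have := Int.emod_nonneg (j - i) (show (n : Int) ≠ 0 by omega)
      omega
    have hlt : (j - i) % (n : Int) < (n : Int) :=
      Int.emod_lt_of_pos _ (by exact_mod_cast hn)
    have hk' : ((j - i') % (n : Int)).toNat = k := by
      have e1 : (j - i') % (n : Int) = (j - (i + 1)) % (n : Int) := by
        conv_lhs => rw [Int.sub_emod]
        rw [hi', Int.emod_emod_of_dvd _ dvd_rfl, ← Int.sub_emod]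
      have e2 : (j - (i + 1)) % (n : Int) = ((j - i) % (n : Int) - 1) % (n : Int) := by
        rw [show j - (i + 1) = j - i - 1 by ring]
        conv_rhs => rw [Int.sub_emod]
        rw [Int.emod_emod_of_dvd _ dvd_rfl, ← Int.sub_emod]
      have e3 : ((j - i) % (n : Int) - 1) % (n : Int) = (j - i) % (n : Int) - 1 :=
        Int.emod_eq_of_lt (by omega) (by omega)
      rw [e1, e2, e3]
      omega
    rw [ih m' i' (acc + PySem.List.pyGetD d i 0) hi'0 hi'n hk' (by omega)]
    have hws : pvWalkSum d n (k + 1) i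
        = PySem.List.pyGetD d i 0 + pvWalkSum d n k i' := by
      simp only [pvWalkSum, hmod]
    rw [hws]
    ring_nf

-- B's walk equals the hop-count walk sum
theorem pv_walk_eq (d : List Int) (n : Nat) (i j : Int) (hn : 0 < n)
    (hi0 : 0 ≤ i) (hin : i < (n : Int)) (hj0 : 0 ≤ j) (hjn : j < (n : Int)) :
    pvWalkB d n i j = pvWalkSum d n (((j - i) % (n : Int)).toNat) i := by
  have hk : (((j - i) % (n : Int)).toNat) < n := by
    have h1 := Int.emod_lt_of_pos (j - i) (show (0 : Int) < (n : Int) by exact_mod_cast hn)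
    have h2 := Int.emod_nonneg (j - i) (show (n : Int) ≠ 0 by omega)
    omega
  have hfold : pvWalkB d n i j = ((pvStep d n j)^[n] ((0 : Int), i, false)).1 := by
    unfold pvWalkB
    rw [show (fun (st : Int × Int × Bool) (_ : Nat) =>
        match st with
        | (acc, i2, br) =>
          if br then (acc, i2, br)
          else if i2 = j then (acc, i2, true)
          else (acc + PySem.List.pyGetD d i2 0, PySem.Int.mod (i2 + 1) (n : Int), false))
      = (fun st (_ : Nat) => pvStep d n j st) from rfl]
    rw [pv_foldl_range_const]
  rw [hfold, pv_iter_walk d n j hn hj0 hjn _ n i 0 hi0 hin rfl hk]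
  simp

-- contiguous walk (no wrap): k hops from i staying within the list
theorem pv_walkSum_seg (d : List Int) (n : Nat) (hd : d.length = n) :
    ∀ (k : Nat) (i : Int), 0 ≤ i → i.toNat + k ≤ n →
      pvWalkSum d n k i = ((d.drop i.toNat).take k).sum := by
  intro k
  induction k with
  | zero => intro i _ _; simp [pvWalkSum]
  | succ k ih =>
    intro i hi0 hik
    have hilt : i.toNat < d.length := by omega
    have hget : PySem.List.pyGetD d i 0 = d.getD i.toNat 0 := by
      conv_lhs => rw [show i = ((i.toNat : Nat) : Int) by omega]
      exact PySem.List.pyGetD_natCast d i.toNat 0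
    have hdrop : d.drop i.toNat = d.getD i.toNat 0 :: d.drop (i.toNat + 1) := by
      rw [List.getD_eq_getElem d 0 hilt]
      exact List.drop_eq_getElem_cons hilt
    simp only [pvWalkSum]
    rw [hget, hdrop, List.take_succ_cons, List.sum_cons]
    by_cases hend : i.toNat + 1 = n
    · -- last stop: k = 0 hops remain
      have hk0 : k = 0 := by omega
      subst hk0
      simp [pvWalkSum]
    · have hmod : PySem.Int.mod (i + 1) (n : Int) = i + 1 := by
        rw [PySem.Int.mod_eq_emod_of_pos (by exact_mod_cast (show 0 < n by omega))]
        exact Int.emod_eq_of_lt (by omega) (by omega)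
      rw [hmod, ih (i + 1) (by omega) (by omega),
        show (i + 1).toNat = i.toNat + 1 by omega]

-- wrapping walk: from i to the end of the list, then jn more hops from stop 0
theorem pv_walkSum_wrap (d : List Int) (n : Nat) (hd : d.length = n) :
    ∀ (m : Nat) (i : Int), 0 ≤ i → i < (n : Int) → n - i.toNat = m →
      ∀ (jn : Nat), jn ≤ i.toNat →
        pvWalkSum d n (m + jn) i = (d.drop i.toNat).sum + (d.take jn).sum := by
  intro m
  induction m with
  | zero => intro i hi0 hin hm; omega
  | succ m ih =>
    intro i hi0 hin hm jn hjn
    have hilt : i.toNat < d.length := by omega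
    have hget : PySem.List.pyGetD d i 0 = d.getD i.toNat 0 := by
      conv_lhs => rw [show i = ((i.toNat : Nat) : Int) by omega]
      exact PySem.List.pyGetD_natCast d i.toNat 0
    have hdrop : d.drop i.toNat = d.getD i.toNat 0 :: d.drop (i.toNat + 1) := by
      rw [List.getD_eq_getElem d 0 hilt]
      exact List.drop_eq_getElem_cons hilt
    rw [show m + 1 + jn = (m + jn) + 1 by omega]
    simp only [pvWalkSum]
    rw [hget]
    by_cases hend : i.toNat + 1 = n
    · -- wrap to stop 0: m = 0, and the remaining jn hops from 0 are contiguous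
      have hm0 : m = 0 := by omega
      subst hm0
      have hmod : PySem.Int.mod (i + 1) (n : Int) = 0 := by
        rw [PySem.Int.mod_eq_emod_of_pos (by exact_mod_cast (show 0 < n by omega)),
          show i + 1 = (n : Int) by omega]
        simp
      rw [hmod]
      simp only [Nat.zero_add]
      rw [pv_walkSum_seg d n hd jn 0 le_rfl (by simp; omega)]
      rw [hdrop, show d.drop (i.toNat + 1) = [] from List.drop_eq_nil_of_le (by omega)]
      simp
    · have hmod : PySem.Int.mod (i + 1) (n : Int) = i + 1 := by
        rw [PySem.Int.mod_eq_emod_of_pos (by exact_mod_cast (show 0 < n by omega))]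
        exact Int.emod_eq_of_lt (by omega) (by omega)
      rw [hmod, ih (i + 1) (by omega) (by omega) (by omega) jn (by omega)]
      rw [hdrop, show (i + 1).toNat = i.toNat + 1 by omega]
      simp [add_assoc]

-- ===== A-side fold lemmas (the partitioned-sum reading of A's three loops) =====

theorem pv_foldl_add_map {α : Type} (f : α → Int) :
    ∀ (l : List α) (init : Int),
      l.foldl (fun acc i => acc + f i) init = init + (l.map f).sum := by
  intro l
  induction l with
  | nil => simp
  | cons x xs ih => intro init; simp [List.foldl_cons, ih]; ring

theorem pv_map_pyGetD_pyRange_slice (xs : List Int) (a b : Int)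
    (ha : 0 ≤ a) (hab : a ≤ b) (hb : b ≤ (xs.length : Int)) :
    (PySem.List.pyRange a b 1).map (fun i => PySem.List.pyGetD xs i 0)
      = PySem.List.slice xs (some a) (some b) := by
  have hall := PySem.List.map_pyGetD_pyRange xs (0 : Int) ha
  rw [PySem.List.len_eq, PySem.List.pyRange_one_append a b (xs.length : Int) hab hb,
    List.map_append] at hall
  have hlen : ((PySem.List.pyRange a b 1).map (fun i => PySem.List.pyGetD xs i 0)).length
      = b.toNat - a.toNat := by
    simp [PySem.List.length_pyRange_one]; omega
  rw [PySem.List.slice_toNat xs ha (le_trans ha hab), ← hall, List.take_left' hlen]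

theorem pv_fold_seg (xs : List Int) (a b : Int) (init : Int)
    (ha : 0 ≤ a) (hab : a ≤ b) (hb : b ≤ (xs.length : Int)) :
    (PySem.List.pyRange a b 1).foldl (fun acc i => acc + PySem.List.pyGetD xs i 0) init
      = init + (PySem.List.slice xs (some a) (some b)).sum := by
  rw [pv_foldl_add_map (fun i => PySem.List.pyGetD xs i 0) _ init,
    pv_map_pyGetD_pyRange_slice xs a b ha hab hb]

theorem pv_slice_take (xs : List Int) (b : Int) (hb : 0 ≤ b) :
    PySem.List.slice xs (some 0) (some b) = xs.take b.toNat := by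
  rw [PySem.List.slice_toNat xs le_rfl hb]; simp

theorem pv_slice_drop (xs : List Int) (a : Int) (ha : 0 ≤ a) :
    PySem.List.slice xs (some a) (some (xs.length : Int)) = xs.drop a.toNat := by
  rw [PySem.List.slice_toNat xs ha (Int.natCast_nonneg _), Int.toNat_natCast]
  exact List.take_of_length_le (by simp)

-- B's two walks between lo < hi (both in range): the inner segment and the wrapped complement
theorem pv_walk_pair (d : List Int) (lo hi : Int)
    (h0 : 0 ≤ lo) (hlh : lo < hi) (hhl : hi < (d.length : Int)) :
    pvWalkB d d.length lo hi = (PySem.List.slice d (some lo) (some hi)).sum ∧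
    pvWalkB d d.length hi lo = (d.drop hi.toNat).sum + (d.take lo.toNat).sum := by
  have hn : 0 < d.length := by omega
  constructor
  · rw [pv_walk_eq d d.length lo hi hn h0 (by omega) (by omega) hhl]
    have hmod : (hi - lo) % (d.length : Int) = hi - lo :=
      Int.emod_eq_of_lt (by omega) (by omega)
    rw [hmod, pv_walkSum_seg d d.length rfl _ lo h0 (by omega),
      PySem.List.slice_toNat d h0 (by omega)]
    congr 2
    omega
  · rw [pv_walk_eq d d.length hi lo hn (by omega) hhl h0 (by omega)]
    have h1 : (lo - hi) % (d.length : Int) = lo - hi + (d.length : Int) := by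
      have e : (lo - hi) % (d.length : Int)
          = (lo - hi + (d.length : Int) * 1) % (d.length : Int) :=
        (Int.add_mul_emod_self_left (lo - hi) (d.length : Int) 1).symm
      rw [e, Int.emod_eq_of_lt (by omega) (by omega)]
      ring
    rw [h1, show (lo - hi + (d.length : Int)).toNat
        = (d.length - hi.toNat) + lo.toNat by omega,
      pv_walkSum_wrap d d.length rfl (d.length - hi.toNat) hi (by omega) hhl
        (by omega) lo.toNat (by omega)]

-- the main agreement lemma, for in-range stop indices
theorem pv_main (distance : List Int) (start destination : Int)
    (hs : 0 ≤ start) (hsl : start < (distance.length : Int))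
    (hd : 0 ≤ destination) (hdl : destination < (distance.length : Int)) :
    distanceBetweenBusStops distance start destination
      = distanceBetweenBusStops_alt distance start destination := by
  have hn : 0 < distance.length := by omega
  have hB : distanceBetweenBusStops_alt distance start destination
      = min (pvWalkB distance distance.length start destination)
            (pvWalkB distance distance.length destination start) := rfl
  by_cases heq : start = destination
  · subst heq
    have hw : pvWalkB distance distance.length start start = 0 := by
      rw [pv_walk_eq distance distance.length start start hn hs hsl hs hsl]
      simp [pvWalkSum]
    simp [distanceBetweenBusStops, hB, hw]
  · by_cases hgt : start > destination
    · -- swapped: lo = destination, hi = start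
      obtain ⟨e1, e2⟩ := pv_walk_pair distance destination start hd (by omega) hsl
      have hA : distanceBetweenBusStops distance start destination
          = min ((0 : Int) + (PySem.List.slice distance (some destination) (some start)).sum)
              (((0 : Int) + (distance.take destination.toNat).sum)
                + (distance.drop start.toNat).sum) := by
        simp only [distanceBetweenBusStops, if_neg heq, if_pos hgt]
        rw [pv_fold_seg distance destination start 0 hd (by omega) (by omega),
          pv_fold_seg distance 0 destination 0 le_rfl hd (by omega),
          pv_fold_seg distance start (distance.length : Int) _ (by omega) (by omega) le_rfl,
          pv_slice_take distance destination hd,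
          pv_slice_drop distance start (by omega)]
      rw [hA, hB, e1, e2]
      omega
    · have hlt : start < destination := by omega
      obtain ⟨e1, e2⟩ := pv_walk_pair distance start destination hs hlt hdl
      have hA : distanceBetweenBusStops distance start destination
          = min ((0 : Int) + (PySem.List.slice distance (some start) (some destination)).sum)
              (((0 : Int) + (distance.take start.toNat).sum)
                + (distance.drop destination.toNat).sum) := by
        simp only [distanceBetweenBusStops, if_neg heq, if_neg hgt]
        rw [pv_fold_seg distance start destination 0 hs (by omega) (by omega),
          pv_fold_seg distance 0 start 0 le_rfl hs (by omega),
          pv_fold_seg distance destination (distance.length : Int) _ (by omega) (by omega) le_rfl,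
          pv_slice_take distance start hs,
          pv_slice_drop distance destination (by omega)]
      rw [hA, hB, e1, e2]
      omega

-- for equal stops the walk breaks on its first iteration: nothing is ever indexed
theorem pv_walk_self (d : List Int) (n : Nat) (i : Int) : pvWalkB d n i i = 0 := by
  have hfold : pvWalkB d n i i = ((pvStep d n i)^[n] ((0 : Int), i, false)).1 := by
    unfold pvWalkB
    rw [show (fun (st : Int × Int × Bool) (_ : Nat) =>
        match st with
        | (acc, i2, br) =>
          if br then (acc, i2, br)
          else if i2 = i then (acc, i2, true)
          else (acc + PySem.List.pyGetD d i2 0, PySem.Int.mod (i2 + 1) (n : Int), false))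
      = (fun st (_ : Nat) => pvStep d n i st) from rfl]
    rw [pv_foldl_range_const]
  rw [hfold]
  cases n with
  | zero => rfl
  | succ m =>
    rw [Function.iterate_succ_apply, show pvStep d (m + 1) i ((0 : Int), i, false)
        = ((0 : Int), i, true) by simp [pvStep], pv_step_done]

-- ===== VERDICT (by name: the statement is the Claim_ definition above) =====
theorem distanceBetweenBusStops_spec : Claim_equal_distanceBetweenBusStops := by
  intro distance start destination _ hpre
  unfold Spec_distanceBetweenBusStops
  rcases hpre with ⟨hs, hsl, hd, hdl⟩ | heq
  · exact pv_main distance start destination hs hsl hd hdl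
  · subst heq
    show distanceBetweenBusStops distance start start
      = distanceBetweenBusStops_alt distance start start
    rw [show distanceBetweenBusStops distance start start = 0 by
      unfold distanceBetweenBusStops; rw [if_pos rfl]]
    show (0 : Int) = min (pvWalkB distance distance.length start start)
      (pvWalkB distance distance.length start start)
    rw [pv_walk_self]
    rfl
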